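-- pv_equiv track=rewrite | github.com/nermadie/CodeForces_Solutions | TestingRound19Div3/prob04.py | solve
-- ===== SOURCE A (Python) =====
-- def solve(s):
--     n = len(s)
--     count_same = [0] * n
--     for i in range(1, n):
--         cur_count = count_same[i - 1]
--         # Get back and check the last s[i-1] s[i] pattern by s[i-1]
--         while s[cur_count] != s[i] and cur_count > 0:
--             cur_count = count_same[cur_count - 1]
--         if s[cur_count] == s[i]:
--             cur_count += 1
--         count_same[i] = cur_count
--     if count_same[-1] > n // 2:
--         return "YES\n" + s[: count_same[-1]]
--     else:
--         return "NO"
-- ===== SOURCE B (Python) =====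
-- def solve(s):
--     # Scan candidate border lengths k from n-1 down; only k > n//2 can qualify.
--     n = len(s)
--     for k in range(n - 1, n // 2, -1):
--         if s[:k] == s[n - k:]:
--             return "YES\n" + s[:k]
--     return "NO"
-- ===== Notes on version B (the rewrite author's own statement) =====
-- stated objective: simpler
-- what changed: Replaces the KMP prefix-function table with a direct descending scan over candidate border lengths k in (n//2, n), returning the first k whose prefix equals the suffix.
-- crash fix: On the empty string A raises IndexError (count_same[-1] on an empty list) while B returns 'NO'. — e.g. on solve(""): A raises IndexError, B returns "NO"
import Mathlib
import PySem

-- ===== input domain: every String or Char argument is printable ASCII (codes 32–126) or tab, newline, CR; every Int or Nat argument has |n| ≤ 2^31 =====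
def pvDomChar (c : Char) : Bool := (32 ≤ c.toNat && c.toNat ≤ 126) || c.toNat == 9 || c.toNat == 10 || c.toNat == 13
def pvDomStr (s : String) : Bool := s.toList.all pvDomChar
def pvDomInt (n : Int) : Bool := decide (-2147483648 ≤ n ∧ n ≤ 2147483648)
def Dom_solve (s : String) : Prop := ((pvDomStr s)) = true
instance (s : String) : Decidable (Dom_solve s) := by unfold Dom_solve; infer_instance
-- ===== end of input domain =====

-- B replaces A's KMP prefix-function table by a plain descending scan over the
-- candidate border lengths k > n//2, comparing prefix and suffix directly (simpler, not faster).

-- ===== PORT A =====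
-- A's inner `while` loop; it is called with fuel = cur_count, which suffices because every
-- table entry is strictly below its own index (proved in the lemmas below), so on inputs
-- where the Python loop terminates this computes exactly its result.
def fallA (l : List Char) (tbl : List Nat) (ci : Char) : Nat → Nat → Nat
  | c, 0 => c
  | c, fuel+1 =>
      if l.getD c ' ' ≠ ci ∧ 0 < c then fallA l tbl ci (tbl.getD (c-1) 0) fuel else c
-- one iteration of A's `for i in range(1, n)` body (indices are always in range, so getD is exact)
def stepA (l : List Char) (tbl : List Nat) (i : Nat) : List Nat :=
  let cur0 := tbl.getD (i - 1) 0
  let cur1 := fallA l tbl (l.getD i ' ') cur0 cur0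
  let cur2 := if l.getD cur1 ' ' = l.getD i ' ' then cur1 + 1 else cur1
  tbl ++ [cur2]
def tblA (l : List Char) (m : Nat) : List Nat := (List.range' 1 m).foldl (stepA l) [0]
def solve (s : String) : String :=
  let l := s.toList
  let n := l.length
  let t := tblA l (n - 1)
  let last := t.getD (n - 1) 0
  if n / 2 < last then "YES\n" ++ String.ofList (l.take last) else "NO"

-- ===== PORT B =====
-- descending k-loop `for k in range(n-1, n//2, -1)` with early return = find? on that list
def solve_alt (s : String) : String :=
  let l := s.toList
  let n := l.length
  let ks := (List.range' (n / 2 + 1) (n - 1 - n / 2)).reverse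
  match ks.find? (fun k => l.take k == l.drop (n - k)) with
  | some k => "YES\n" ++ String.ofList (l.take k)
  | none => "NO"

-- ===== PRECONDITION & SPEC =====
-- Pre_ excludes only the empty string, on which A raises IndexError (count_same[-1] on []).
def Pre_solve (s : String) : Prop := s ≠ ""
instance (s : String) : Decidable (Pre_solve s) := by unfold Pre_solve; infer_instance
def pvWitness_solve : String := "abab"
-- On the empty string A raises IndexError (count_same[-1] on an empty list) while B returns "NO".
def Raises_solve (s : String) : Prop := s = ""
instance (s : String) : Decidable (Raises_solve s) := by unfold Raises_solve; infer_instance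
def pvRaiseWitness_solve : String := ""
def pvRaiseWitnessOut_solve : String := "NO"
def Spec_solve (s : String) (out : String) : Prop := out = solve_alt s
instance (s : String) (out : String) : Decidable (Spec_solve s out) := by unfold Spec_solve; infer_instance

-- ===== CLAIM (what is proved, stated in full; the proofs are below) =====
def Claim_equal_solve : Prop := ∀ (s : String), Dom_solve s → Pre_solve s → Spec_solve s (solve s)
def Claim_raises_solve : Prop := (∀ (s : String), Dom_solve s → Raises_solve s → ¬ Pre_solve s) ∧ (Dom_solve (pvRaiseWitness_solve) ∧ Raises_solve (pvRaiseWitness_solve) ∧ solve_alt (pvRaiseWitness_solve) = pvRaiseWitnessOut_solve)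

-- ===== LEMMAS AND PROOFS =====

-- `IsB l i k`: k is a proper border of the length-i prefix of l (pointwise, via getD).
def IsB (l : List Char) (i k : Nat) : Prop :=
  k < i ∧ ∀ j, j < k → l.getD j ' ' = l.getD (i - k + j) ' '

-- `MaxB l i c`: c is the longest proper border of the length-i prefix (= prefix function).
def MaxB (l : List Char) (i c : Nat) : Prop :=
  IsB l i c ∧ ∀ k, IsB l i k → k ≤ c

theorem isB_zero (l : List Char) (i : Nat) (h : 0 < i) : IsB l i 0 :=
  ⟨h, fun j hj => absurd hj (Nat.not_lt_zero j)⟩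

-- a border of a border is a border
theorem isB_trans (l : List Char) {i c k : Nat} (h1 : IsB l c k) (h2 : IsB l i c) :
    IsB l i k := by
  obtain ⟨hkc, H1⟩ := h1
  obtain ⟨hci, H2⟩ := h2
  refine ⟨by omega, fun j hj => ?_⟩
  have e1 := H1 j hj
  have e2 := H2 (c - k + j) (by omega)
  have : i - c + (c - k + j) = i - k + j := by omega
  rw [this] at e2
  exact e1.trans e2

-- a shorter border is a border of a longer one
theorem isB_chain (l : List Char) {i c k : Nat} (h1 : IsB l i k) (h2 : IsB l i c)
    (hlt : k < c) : IsB l c k := by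
  obtain ⟨hki, H1⟩ := h1
  obtain ⟨hci, H2⟩ := h2
  refine ⟨hlt, fun j hj => ?_⟩
  have e1 := H1 j hj
  have e2 := H2 (c - k + j) (by omega)
  have : i - c + (c - k + j) = i - k + j := by omega
  rw [this] at e2
  exact e1.trans e2.symm

-- extending a border by one matching character
theorem isB_succ (l : List Char) {i k : Nat} (h : IsB l i k)
    (hc : l.getD k ' ' = l.getD i ' ') : IsB l (i+1) (k+1) := by
  obtain ⟨hki, H⟩ := h
  refine ⟨by omega, fun j hj => ?_⟩
  rcases Nat.lt_or_ge j k with hjk | hjk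
  · have := H j hjk
    have e : i + 1 - (k + 1) + j = i - k + j := by omega
    rw [e]; exact this
  · have hj' : j = k := by omega
    have e : i + 1 - (k + 1) + j = i := by omega
    rw [e, hj']; exact hc

-- shrinking a positive border of the extended prefix
theorem isB_pred (l : List Char) {i k : Nat} (h : IsB l (i+1) (k+1)) :
    IsB l i k ∧ l.getD k ' ' = l.getD i ' ' := by
  obtain ⟨hki, H⟩ := h
  have hk : k < i := by omega
  constructor
  · refine ⟨hk, fun j hj => ?_⟩
    have := H j (by omega)
    have e : i + 1 - (k + 1) + j = i - k + j := by omega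
    rw [e] at this; exact this
  · have := H k (by omega)
    have e : i + 1 - (k + 1) + k = i := by omega
    rw [e] at this; exact this

-- correctness of A's fallback while-loop (fuel = c always suffices)
theorem fall_spec (l : List Char) (t : List Nat) (i : Nat)
    (Ht : ∀ j, j < t.length → MaxB l (j+1) (t.getD j 0)) (hlen : t.length = i) :
    ∀ fuel c, c ≤ fuel → IsB l i c →
      (∀ k, IsB l i k → l.getD k ' ' = l.getD i ' ' → k ≤ c) →
      IsB l i (fallA l t (l.getD i ' ') c fuel) ∧
      (l.getD (fallA l t (l.getD i ' ') c fuel) ' ' = l.getD i ' ' ∨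
        fallA l t (l.getD i ' ') c fuel = 0) ∧
      (∀ k, IsB l i k → l.getD k ' ' = l.getD i ' ' →
        k ≤ fallA l t (l.getD i ' ') c fuel) := by
  intro fuel
  induction fuel with
  | zero =>
      intro c hc hB hM
      have hc0 : c = 0 := Nat.le_zero.mp hc
      subst hc0
      exact ⟨hB, Or.inr rfl, hM⟩
  | succ fuel ih =>
      intro c hc hB hM
      by_cases hcond : l.getD c ' ' ≠ l.getD i ' ' ∧ 0 < c
      · have hst : fallA l t (l.getD i ' ') c (fuel+1)
            = fallA l t (l.getD i ' ') (t.getD (c-1) 0) fuel := by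
          simp only [fallA]
          rw [if_pos hcond]
        obtain ⟨hne, hcpos⟩ := hcond
        have hci : c < i := hB.1
        have hidx : c - 1 < t.length := by omega
        have hmax : MaxB l c (t.getD (c-1) 0) := by
          have := Ht (c-1) hidx
          have e : c - 1 + 1 = c := by omega
          rwa [e] at this
        set c' := t.getD (c-1) 0 with hc'
        have hc'lt : c' < c := hmax.1.1
        have hB' : IsB l i c' := isB_trans l hmax.1 hB
        have hM' : ∀ k, IsB l i k → l.getD k ' ' = l.getD i ' ' → k ≤ c' := by
          intro k hk hkc
          have hkle : k ≤ c := hM k hk hkc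
          have hkne : k ≠ c := by
            intro h; subst h; exact hne hkc
          have hklt : k < c := by omega
          exact hmax.2 k (isB_chain l hk hB hklt)
        rw [hst]
        exact ih c' (by omega) hB' hM'
      · have hst : fallA l t (l.getD i ' ') c (fuel+1) = c := by
          simp only [fallA, if_neg hcond]
        rw [hst]
        refine ⟨hB, ?_, hM⟩
        by_cases he : l.getD c ' ' = l.getD i ' '
        · exact Or.inl he
        · right
          by_contra hc0
          exact hcond ⟨he, Nat.pos_of_ne_zero hc0⟩

-- the table built by A computes the prefix function of every prefix
theorem tbl_spec (l : List Char) : ∀ m,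
    (tblA l m).length = m + 1 ∧ ∀ j, j < m + 1 → MaxB l (j+1) ((tblA l m).getD j 0) := by
  intro m
  induction m with
  | zero =>
      refine ⟨rfl, fun j hj => ?_⟩
      have hj0 : j = 0 := by omega
      subst hj0
      have e : (tblA l 0).getD 0 0 = 0 := rfl
      rw [e]
      exact ⟨isB_zero l 1 Nat.one_pos, fun k hk => by have := hk.1; omega⟩
  | succ m ih =>
      obtain ⟨hlen, H⟩ := ih
      have hfold : tblA l (m+1) = stepA l (tblA l m) (1 + m) := by
        unfold tblA
        rw [List.range'_concat, List.foldl_append]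
        simp only [List.foldl_cons, List.foldl_nil, Nat.one_mul]
      set t := tblA l m with ht
      have h1m : 1 + m = m + 1 := by omega
      have hcur0 : MaxB l (m+1) (t.getD m 0) := H m (by omega)
      have hfall := fall_spec l t (m+1) (by rw [hlen]; exact fun j hj => H j hj) (by omega)
        (t.getD m 0) (t.getD m 0) (le_refl _) hcur0.1
        (fun k hk _ => hcur0.2 k hk)
      set r := fallA l t (l.getD (m+1) ' ') (t.getD m 0) (t.getD m 0) with hr
      obtain ⟨hrB, hrAlt, hrMax⟩ := hfall
      set cur2 := if l.getD r ' ' = l.getD (m+1) ' ' then r + 1 else r with hcur2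
      have hmax2 : MaxB l (m+2) cur2 := by
        by_cases he : l.getD r ' ' = l.getD (m+1) ' '
        · rw [hcur2, if_pos he]
          refine ⟨isB_succ l hrB he, fun k hk => ?_⟩
          match k with
          | 0 => omega
          | k+1 =>
            obtain ⟨hkB, hke⟩ := isB_pred l hk
            have := hrMax k hkB hke
            omega
        · rw [hcur2, if_neg he]
          have hr0 : r = 0 := by
            rcases hrAlt with h | h
            · exact absurd h he
            · exact h
          refine ⟨by rw [hr0]; exact isB_zero l (m+2) (by omega), fun k hk => ?_⟩
          match k with
          | 0 => omega
          | k+1 =>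
            obtain ⟨hkB, hke⟩ := isB_pred l hk
            have hk0 : k ≤ r := hrMax k hkB hke
            rw [hr0] at hk0
            have hk0' : k = 0 := by omega
            subst hk0'
            rw [hr0] at he
            exact absurd hke he
      have hstep : stepA l t (1 + m) = t ++ [cur2] := by
        rw [h1m]
        rfl
      rw [hfold, hstep]
      constructor
      · simp [hlen]
      · intro j hj
        rcases Nat.lt_or_ge j (m+1) with hjm | hjm
        · rw [List.getD_append t [cur2] 0 j (by omega)]
          exact H j hjm
        · have hj' : j = m + 1 := by omega
          subst hj'
          have : (t ++ [cur2]).getD (m+1) 0 = cur2 := by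
            have : t.length = m + 1 := hlen
            simp [List.getD, this]
          rw [this]
          exact hmax2
      
-- B's test `s[:k] == s[n-k:]` decides IsB for k < n
theorem border_iff (l : List Char) (k : Nat) (hk : k < l.length) :
    (l.take k == l.drop (l.length - k)) = true ↔ IsB l l.length k := by
  rw [beq_iff_eq]
  constructor
  · intro h
    refine ⟨hk, fun j hj => ?_⟩
    have hjl : j < l.length := by omega
    have hjt : j < (l.take k).length := by simp; omega
    have hjd : j < (l.drop (l.length - k)).length := by simp; omega
    have := List.getElem_of_eq h hjt
    rw [List.getElem_take, List.getElem_drop] at this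
    rw [List.getD_eq_getElem l ' ' hjl, List.getD_eq_getElem l ' ' (by omega : l.length - k + j < l.length)]
    exact this
  · intro ⟨_, H⟩
    apply List.ext_getElem
    · simp; omega
    · intro j h1 h2
      rw [List.getElem_take, List.getElem_drop]
      have hjk : j < k := by
        simp only [List.length_take] at h1
        omega
      have := H j hjk
      rw [List.getD_eq_getElem l ' ' (by omega), List.getD_eq_getElem l ' ' (by omega)] at this
      exact this

-- find? over a strictly descending list returns the known maximum satisfying element
theorem find_desc (p : Nat → Bool) (P : Nat) :
    ∀ ks : List Nat, List.Pairwise (· > ·) ks → P ∈ ks → p P = true →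
      (∀ k, k ∈ ks → p k = true → k ≤ P) → ks.find? p = some P := by
  intro ks
  induction ks with
  | nil => intro _ h; exact absurd h (List.not_mem_nil)
  | cons h t ih =>
      intro hpw hmem hP hmax
      by_cases hph : p h = true
      · have hle : h ≤ P := hmax h List.mem_cons_self hph
        have hhp : h = P := by
          rcases List.mem_cons.mp hmem with he | ht
          · omega
          · have : h > P := (List.pairwise_cons.mp hpw).1 P ht
            omega
        rw [List.find?_cons_of_pos hph, hhp]
      · have hne : h ≠ P := fun he => hph (he ▸ hP)
        have ht : P ∈ t := by
          rcases List.mem_cons.mp hmem with he | ht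
          · exact absurd he.symm hne
          · exact ht
        rw [List.find?_cons_of_neg hph]
        exact ih (List.pairwise_cons.mp hpw).2 ht hP
          (fun k hk => hmax k (List.mem_cons_of_mem _ hk))

-- the two ports agree on every nonempty string
theorem solve_eq_alt (s : String) (h : s.toList ≠ []) : solve s = solve_alt s := by
  simp only [solve, solve_alt]
  generalize s.toList = l at h ⊢
  have hn : 0 < l.length := List.length_pos_iff.mpr h
  set n := l.length with hnn
  obtain ⟨hlen, H⟩ := tbl_spec l (n - 1)
  have hPmax : MaxB l n ((tblA l (n-1)).getD (n-1) 0) := by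
    have := H (n-1) (by omega)
    have e : n - 1 + 1 = n := by omega
    rwa [e] at this
  set P := (tblA l (n-1)).getD (n-1) 0 with hP
  have hPlt : P < n := hPmax.1.1
  by_cases hbig : n / 2 < P
  · have hmem : P ∈ (List.range' (n / 2 + 1) (n - 1 - n / 2)).reverse := by
      rw [List.mem_reverse, List.mem_range'_1]
      omega
    have hfind : ((List.range' (n / 2 + 1) (n - 1 - n / 2)).reverse).find?
        (fun k => l.take k == l.drop (n - k)) = some P := by
      apply find_desc
      · rw [List.pairwise_reverse]
        exact List.pairwise_lt_range' 1
      · exact hmem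
      · exact (border_iff l P hPlt).mpr hPmax.1
      · intro k hk hpk
        have hkn : k < n := by
          rw [List.mem_reverse, List.mem_range'_1] at hk
          omega
        exact hPmax.2 k ((border_iff l k hkn).mp hpk)
    rw [if_pos hbig, hfind]
  · have hfind : ((List.range' (n / 2 + 1) (n - 1 - n / 2)).reverse).find?
        (fun k => l.take k == l.drop (n - k)) = none := by
      rw [List.find?_eq_none]
      intro k hk hpk
      rw [List.mem_reverse, List.mem_range'_1] at hk
      have hkn : k < n := by omega
      have := hPmax.2 k ((border_iff l k hkn).mp hpk)
      omega
    rw [if_neg hbig, hfind]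

-- ===== VERDICT (by name: the statement is the Claim_ definition above) =====
theorem solve_spec : Claim_equal_solve := by
  intro s _ hpre
  unfold Spec_solve
  apply solve_eq_alt
  intro hn
  apply hpre
  have := congrArg String.ofList hn
  simpa using this

def solve_raises : Claim_raises_solve := by
  unfold Claim_raises_solve
  exact ⟨fun s _ hr hp => hp hr, by decide⟩
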